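-- pv_equiv track=rewrite | github.com/ragib-work/DSA-5-hr-day-with-ragib | day_4/matrix_04.py | max_min_in_row
-- ===== SOURCE A (Python) =====
-- def max_min_in_row(matrix):
--     max_values = []
--     min_values = []
--     for row in matrix:
--         max_val = float('-inf')
--         min_val = float('inf')
--         for col in row:
--             if col > max_val:
--                 max_val = col
--             if col < min_val:
--                 min_val = col
--         max_values.append(max_val)
--         min_values.append(min_val)
--     return max_values , min_values
-- ===== SOURCE B (Python) =====
-- def max_min_in_row(matrix):
--     sorted_rows = [sorted(row) for row in matrix]
--     return [s[-1] for s in sorted_rows], [s[0] for s in sorted_rows]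
-- ===== Notes on version B (the rewrite author's own statement) =====
-- stated objective: alternative
-- what changed: Replaces the fused manual max/min-tracking scan with a sort-based algorithm: each row is sorted once and the extremes are read off as the sorted row's last and first elements.
-- outside the precondition, e.g. on max_min_in_row([[]]): A returns ([-inf], [inf]), B raises IndexError
import Mathlib
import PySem

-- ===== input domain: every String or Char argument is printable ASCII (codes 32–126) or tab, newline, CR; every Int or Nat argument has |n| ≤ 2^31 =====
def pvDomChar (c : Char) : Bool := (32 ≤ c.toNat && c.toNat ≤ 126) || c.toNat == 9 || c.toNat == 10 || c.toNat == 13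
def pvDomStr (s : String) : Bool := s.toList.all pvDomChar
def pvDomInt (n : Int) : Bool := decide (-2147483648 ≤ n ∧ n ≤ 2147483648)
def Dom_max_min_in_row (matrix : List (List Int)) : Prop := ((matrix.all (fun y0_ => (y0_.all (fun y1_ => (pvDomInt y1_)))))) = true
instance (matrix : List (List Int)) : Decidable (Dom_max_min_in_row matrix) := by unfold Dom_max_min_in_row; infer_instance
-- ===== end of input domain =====

-- B replaces A's fused manual max/min-tracking scan with a sort-based algorithm:
-- each row is sorted once and its extremes read off as last/first element (alternative).


-- ===== PORT A =====
-- A's sentinels float('-inf')/float('inf') are modelled by Option Int `none`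
-- (always beaten by any col); they survive to the output only on an empty row,
-- which Pre_ excludes — `.getD 0` there is never reached under Pre_.
def mmRowA (row : List Int) : Option Int × Option Int :=
  row.foldl (fun s col =>
    ((if (match s.1 with | none => true | some m => decide (col > m)) then some col else s.1),
     (if (match s.2 with | none => true | some m => decide (col < m)) then some col else s.2)))
    (none, none)

def max_min_in_row (matrix : List (List Int)) : List Int × List Int :=
  matrix.foldl (fun acc row =>
    let p := mmRowA row
    (acc.1 ++ [p.1.getD 0], acc.2 ++ [p.2.getD 0])) ([], [])

-- ===== PORT B =====
-- s[-1] / s[0] raise IndexError on an empty row (excluded by Pre_); `.getD 0` is never reached there.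
def max_min_in_row_alt (matrix : List (List Int)) : List Int × List Int :=
  let sortedRows := matrix.map (fun row => PySem.List.sorted row (fun x => x) false)
  (sortedRows.map (fun s => (PySem.List.pyGet? s (-1)).getD 0),
   sortedRows.map (fun s => (PySem.List.pyGet? s 0).getD 0))

-- ===== PRECONDITION & SPEC =====
-- Pre_ excludes matrices with an empty row, on which A returns the floats
-- (-inf, inf), values outside the declared Int type (B raises IndexError there).
def Pre_max_min_in_row (matrix : List (List Int)) : Prop :=
  (matrix.all (fun r => !r.isEmpty)) = true
instance (matrix : List (List Int)) : Decidable (Pre_max_min_in_row matrix) := by unfold Pre_max_min_in_row; infer_instance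
def pvWitness_max_min_in_row : List (List Int) := [[3, 1, 2], [5], [-4, 7]]

def Spec_max_min_in_row (matrix : List (List Int)) (out : List Int × List Int) : Prop := out = max_min_in_row_alt matrix
instance (matrix : List (List Int)) (out : List Int × List Int) : Decidable (Spec_max_min_in_row matrix out) := by unfold Spec_max_min_in_row; infer_instance

-- ===== CLAIM (what is proved, stated in full; the proofs are below) =====
def Claim_equal_max_min_in_row : Prop := ∀ (matrix : List (List Int)), Dom_max_min_in_row matrix → Pre_max_min_in_row matrix → Spec_max_min_in_row matrix (max_min_in_row matrix)

-- ===== LEMMAS AND PROOFS =====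

theorem mmRowA_go (t : List Int) (a b : Int) :
    t.foldl (fun s col =>
      ((if (match s.1 with | none => true | some m => decide (col > m)) then some col else s.1),
       (if (match s.2 with | none => true | some m => decide (col < m)) then some col else s.2)))
      (some a, some b)
    = (some (t.foldl max a), some (t.foldl min b)) := by
  induction t generalizing a b with
  | nil => rfl
  | cons x t ih =>
      simp only [List.foldl_cons]
      have hmax : (if decide (x > a) = true then some x else some a) = some (max a x) := by
        by_cases h : x > a
        · simp [h, max_eq_right (le_of_lt h)]
        · simp [h, max_eq_left (by omega : x ≤ a)]
      have hmin : (if decide (x < b) = true then some x else some b) = some (min b x) := by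
        by_cases h : x < b
        · simp [h, min_eq_right (le_of_lt h)]
        · simp [h, min_eq_left (by omega : b ≤ x)]
      rw [hmax, hmin, ih]

theorem mmRowA_cons (x : Int) (t : List Int) :
    mmRowA (x :: t) = (some (t.foldl max x), some (t.foldl min x)) := by
  unfold mmRowA
  simp only [List.foldl_cons]
  exact mmRowA_go t x x

theorem foldl_max_spec (t : List Int) (x : Int) :
    t.foldl max x ∈ x :: t ∧ ∀ y ∈ x :: t, y ≤ t.foldl max x := by
  induction t generalizing x with
  | nil => simp
  | cons z t ih =>
      obtain ⟨hm, hle⟩ := ih (max x z)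
      constructor
      · simp only [List.foldl_cons, List.mem_cons]
        rcases List.mem_cons.mp hm with h | h
        · rcases max_choice x z with hc | hc
          · exact Or.inl (h.trans hc)
          · exact Or.inr (Or.inl (h.trans hc))
        · exact Or.inr (Or.inr h)
      · intro y hy
        simp only [List.foldl_cons]
        rcases List.mem_cons.mp hy with h | h
        · rw [h]; exact le_trans (le_max_left x z) (hle _ (by simp))
        · rcases List.mem_cons.mp h with h2 | h2
          · rw [h2]; exact le_trans (le_max_right x z) (hle _ (by simp))
          · exact hle _ (by simp [h2])

theorem foldl_min_spec (t : List Int) (x : Int) :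
    t.foldl min x ∈ x :: t ∧ ∀ y ∈ x :: t, t.foldl min x ≤ y := by
  induction t generalizing x with
  | nil => simp
  | cons z t ih =>
      obtain ⟨hm, hle⟩ := ih (min x z)
      constructor
      · simp only [List.foldl_cons, List.mem_cons]
        rcases List.mem_cons.mp hm with h | h
        · rcases min_choice x z with hc | hc
          · exact Or.inl (h.trans hc)
          · exact Or.inr (Or.inl (h.trans hc))
        · exact Or.inr (Or.inr h)
      · intro y hy
        simp only [List.foldl_cons]
        rcases List.mem_cons.mp hy with h | h
        · rw [h]; exact le_trans (hle _ (by simp)) (min_le_left x z)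
        · rcases List.mem_cons.mp h with h2 | h2
          · rw [h2]; exact le_trans (hle _ (by simp)) (min_le_right x z)
          · exact hle _ (by simp [h2])

theorem pairwise_le_getLast? (s : List Int) (h : s.Pairwise (· ≤ ·)) (m : Int)
    (hl : s.getLast? = some m) : ∀ y ∈ s, y ≤ m := by
  induction s with
  | nil => simp at hl
  | cons a t ih =>
      cases t with
      | nil =>
          simp at hl
          intro y hy; simp at hy; omega
      | cons b u =>
          rw [List.getLast?_cons_cons] at hl
          intro y hy
          rcases List.mem_cons.mp hy with rfl | hy'
          · have hab : y ≤ b := (List.pairwise_cons.mp h).1 b (by simp)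
            have : b ≤ m := ih (List.pairwise_cons.mp h).2 hl b (by simp)
            omega
          · exact ih (List.pairwise_cons.mp h).2 hl y hy'

theorem rowB_eq (x : Int) (t : List Int) :
    ((PySem.List.pyGet? (PySem.List.sorted (x :: t) (fun a => a) false) (-1)).getD 0
       = t.foldl max x) ∧
    ((PySem.List.pyGet? (PySem.List.sorted (x :: t) (fun a => a) false) 0).getD 0
       = t.foldl min x) := by
  set s := PySem.List.sorted (x :: t) (fun a => a) false with hs
  have hmem : ∀ y, y ∈ s ↔ y ∈ x :: t :=
    fun y => PySem.List.mem_sorted (x :: t) (fun a => a) false y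
  have hpw : s.Pairwise (· ≤ ·) := by
    have := PySem.List.sorted_pairwise (x :: t) (fun a : Int => a)
    simpa [← hs] using this
  have hne : s ≠ [] := by
    rw [hs]
    simp [PySem.List.sorted_eq_nil_iff]
  obtain ⟨hd, tl, hcons⟩ := List.exists_cons_of_ne_nil hne
  have hsort : PySem.List.sorted (x :: t) (fun a => a) false = hd :: tl := by
    rw [← hs]; exact hcons
  obtain ⟨hmaxmem, hmaxle⟩ := foldl_max_spec t x
  obtain ⟨hminmem, hminle⟩ := foldl_min_spec t x
  constructor
  · -- last element of s is the max
    rw [PySem.List.pyGet?_neg_one]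
    obtain ⟨m, hm⟩ : ∃ m, s.getLast? = some m := by
      rw [hcons]; exact ⟨_, List.getLast?_eq_some_getLast (by simp)⟩
    rw [hm]
    have hm_mem : m ∈ s := List.mem_of_getLast? hm
    have h1 : m ≤ t.foldl max x := hmaxle m ((hmem m).mp hm_mem)
    have h2 : t.foldl max x ≤ m :=
      pairwise_le_getLast? s hpw m hm _ ((hmem _).mpr hmaxmem)
    simp; omega
  · -- head of s is the min
    rw [hcons, PySem.List.pyGet?_zero_cons]
    have hhd_le : ∀ y ∈ x :: t, hd ≤ y := by
      intro y hy
      have := PySem.List.key_head_sorted_le (x :: t) (fun a : Int => a) hsort y hy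
      simpa using this
    have h1 : hd ≤ t.foldl min x := hhd_le _ hminmem
    have h2 : t.foldl min x ≤ hd := hminle hd ((hmem hd).mp (by rw [hcons]; simp))
    simp; omega

theorem mmA_fold (matrix : List (List Int)) (as bs : List Int)
    (h : (matrix.all (fun r => !r.isEmpty)) = true) :
    matrix.foldl (fun acc row =>
      let p := mmRowA row
      (acc.1 ++ [p.1.getD 0], acc.2 ++ [p.2.getD 0])) (as, bs)
    = (as ++ matrix.map (fun r =>
         (PySem.List.pyGet? (PySem.List.sorted r (fun x => x) false) (-1)).getD 0),
       bs ++ matrix.map (fun r =>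
         (PySem.List.pyGet? (PySem.List.sorted r (fun x => x) false) 0).getD 0)) := by
  induction matrix generalizing as bs with
  | nil => simp
  | cons r t ih =>
      simp only [List.all_cons, Bool.and_eq_true] at h
      cases r with
      | nil => simp at h
      | cons x xs =>
          simp only [List.foldl_cons, List.map_cons]
          rw [ih _ _ h.2, mmRowA_cons]
          obtain ⟨hmx, hmn⟩ := rowB_eq x xs
          simp only [Option.getD_some]
          rw [← hmx, ← hmn]
          simp only [List.append_assoc, List.singleton_append]

-- ===== VERDICT (by name: the statement is the Claim_ definition above) =====
theorem max_min_in_row_spec : Claim_equal_max_min_in_row := by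
  intro matrix _ hpre
  unfold Spec_max_min_in_row max_min_in_row max_min_in_row_alt
  rw [mmA_fold matrix [] [] hpre]
  simp [List.map_map, Function.comp]
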